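-- pv_equiv track=rewrite | github.com/nikoladimitroff/Adder | adder/proplogic.py | __clean_clauses
-- ===== SOURCE A (Python) =====
-- def __clean_clauses(clauses):
--     unique = []
--     for clause in clauses:
--         if clause not in unique:
--             unique.append(clause)
--
--     result = []
--     for clause in unique:
--         is_superset = any([conjuct < clause for conjuct in unique])
--         if not is_superset:
--             result.append(clause)
--
--     return result
-- ===== SOURCE B (Python) =====
-- def __clean_clauses(clauses):
--     # Single pass keeping a running antichain of minimal clauses:
--     # a clause with an already-kept (non-strict) subset is skipped --
--     # this also handles duplicates, so no separate dedup pass is needed;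
--     # kept strict supersets are evicted before the clause is appended.
--     kept = []
--     for clause in clauses:
--         if any(k <= clause for k in kept):
--             continue
--         kept = [k for k in kept if not clause < k]
--         kept.append(clause)
--     return kept
-- ===== Notes on version B (the rewrite author's own statement) =====
-- stated objective: alternative
-- what changed: A's two staged passes (ordered dedup by full-list membership, then for every clause a fresh any-scan over the entire deduped list) are replaced by a single pass that maintains a running antichain: a clause with an already-kept non-strict subset is skipped (which also absorbs duplicates, so the dedup pass disappears), and kept strict supersets are evicted before the clause is appended.
import Mathlib
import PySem

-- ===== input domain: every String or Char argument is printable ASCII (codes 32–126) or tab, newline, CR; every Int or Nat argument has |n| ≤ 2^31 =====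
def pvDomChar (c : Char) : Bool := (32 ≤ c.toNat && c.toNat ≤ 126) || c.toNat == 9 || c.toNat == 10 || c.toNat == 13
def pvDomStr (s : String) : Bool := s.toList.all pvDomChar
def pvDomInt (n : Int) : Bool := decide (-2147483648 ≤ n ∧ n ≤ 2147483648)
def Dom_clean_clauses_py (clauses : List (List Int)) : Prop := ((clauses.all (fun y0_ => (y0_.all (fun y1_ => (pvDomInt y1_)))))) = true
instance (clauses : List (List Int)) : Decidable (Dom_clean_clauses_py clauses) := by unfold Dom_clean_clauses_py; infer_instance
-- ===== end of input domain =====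

-- B replaces A's two staged full scans (ordered dedup, then an any-scan over the whole
-- deduped list per clause) by ONE pass maintaining a running antichain, skipping on a
-- kept non-strict subset (which also absorbs duplicates); objective: alternative.

-- ===== PORT A =====
-- the clauses are Python SETS of ints (modelled as lists of their elements):
-- `a == b` is set equality, `a < b` is strict subset — exact on lists-as-sets.
def pySetEq (a b : List Int) : Bool := a.all (fun x => x ∈ b) && b.all (fun x => x ∈ a)
def pySetLt (a b : List Int) : Bool := a.all (fun x => x ∈ b) && !(b.all (fun x => x ∈ a))

-- literal transliteration of __clean_clauses: ordered dedup loop (membership by set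
-- equality), then keep each clause unless some element of `unique` is a strict subset.
def clean_clauses_py (clauses : List (List Int)) : List (List Int) :=
  let unique := clauses.foldl (fun u clause => if u.any (fun x => pySetEq x clause) then u else u ++ [clause]) []
  unique.foldl (fun result clause =>
    let is_superset := unique.any (fun conjuct => pySetLt conjuct clause)
    if !is_superset then result ++ [clause] else result) []

-- ===== PORT B =====
-- `a <= b` on Python sets: subset (not necessarily strict) — exact on lists-as-sets.
def pySetLe (a b : List Int) : Bool := a.all (fun x => x ∈ b)

-- literal transliteration of Source B: one pass over the raw input; a clause with a kept
-- (non-strict) subset is skipped, kept strict supersets are evicted, clause appended.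
def clean_clauses_py_alt (clauses : List (List Int)) : List (List Int) :=
  clauses.foldl (fun kept clause =>
    if kept.any (fun k => pySetLe k clause) then kept
    else kept.filter (fun k => !pySetLt clause k) ++ [clause]) []

-- ===== PRECONDITION & SPEC =====
def Spec_clean_clauses_py (clauses : List (List Int)) (out : List (List Int)) : Prop := out = clean_clauses_py_alt clauses
instance (clauses : List (List Int)) (out : List (List Int)) : Decidable (Spec_clean_clauses_py clauses out) := by unfold Spec_clean_clauses_py; infer_instance

-- ===== CLAIM (what is proved, stated in full; the proofs are below) =====
def Claim_equal_clean_clauses_py : Prop := ∀ (clauses : List (List Int)), Dom_clean_clauses_py clauses → Spec_clean_clauses_py clauses (clean_clauses_py clauses)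

-- ===== LEMMAS AND PROOFS =====

-- `pySetLt` is strict inclusion of the underlying finite sets
theorem pySetLt_iff (a b : List Int) : pySetLt a b = true ↔ a.toFinset ⊂ b.toFinset := by
  simp [pySetLt, ssubset_iff_subset_not_subset, Finset.subset_iff, List.all_eq_true]

-- `pySetEq` is equality of the underlying finite sets
theorem pySetEq_iff (a b : List Int) : pySetEq a b = true ↔ a.toFinset = b.toFinset := by
  simp [pySetEq, Finset.ext_iff, List.all_eq_true]
  constructor
  · rintro ⟨h1, h2⟩ x; exact ⟨fun hx => h1 x hx, fun hx => h2 x hx⟩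
  · intro h; exact ⟨fun x hx => (h x).1 hx, fun x hx => (h x).2 hx⟩

-- `<=` is `<` or `==` (Boolean identity on the helpers)
theorem pySetLe_eq (a b : List Int) : pySetLe a b = (pySetLt a b || pySetEq a b) := by
  simp only [pySetLe, pySetLt, pySetEq]
  cases a.all (fun x => x ∈ b) <;> cases b.all (fun x => x ∈ a) <;> rfl

-- A's dedup loop, as a function of the input prefix
def dd (l : List (List Int)) : List (List Int) :=
  l.foldl (fun u clause => if u.any (fun x => pySetEq x clause) then u else u ++ [clause]) []

-- A's "minimal elements" filter of a list of clauses
def minFil (l : List (List Int)) : List (List Int) :=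
  l.filter (fun clause => !(l.any (fun conjuct => pySetLt conjuct clause)))

-- whenever something in l sits strictly below c, something MINIMAL in l does
theorem descent (l : List (List Int)) (c : List Int)
    (h : ∃ k ∈ l, pySetLt k c = true) :
    ∃ k ∈ l, pySetLt k c = true ∧ ∀ k' ∈ l, ¬ pySetLt k' k = true := by
  obtain ⟨k, hk, hkc⟩ := h
  have hne : l.filter (fun k => pySetLt k c) ≠ [] := by
    intro hnil
    have := List.filter_eq_nil_iff.mp hnil k hk
    simp [hkc] at this
  obtain ⟨k0, hk0⟩ := Option.ne_none_iff_exists'.mp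
    (mt (List.argmin_eq_none (f := fun k : List Int => k.toFinset.card)).mp hne)
  have hk0mem : k0 ∈ List.argmin (fun k : List Int => k.toFinset.card)
      (l.filter (fun k => pySetLt k c)) := Option.mem_def.mpr hk0
  have hk0' := List.mem_filter.mp (List.argmin_mem hk0mem)
  refine ⟨k0, hk0'.1, hk0'.2, ?_⟩
  intro k' hk' hlt
  have hss : k'.toFinset ⊂ k0.toFinset := (pySetLt_iff k' k0).mp hlt
  have hk'c : pySetLt k' c = true := by
    rw [pySetLt_iff]
    exact hss.trans ((pySetLt_iff k0 c).mp hk0'.2)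
  have hcard : k0.toFinset.card ≤ k'.toFinset.card :=
    List.le_of_mem_argmin (f := fun k : List Int => k.toFinset.card) (List.mem_filter.mpr ⟨hk', hk'c⟩) hk0mem
  exact absurd (Finset.card_lt_card hss) (by omega)

-- the minimal-filter sees a strict subset of c iff the whole list does
theorem any_minFil (pre : List (List Int)) (c : List Int) :
    (minFil pre).any (fun k => pySetLt k c) = pre.any (fun k => pySetLt k c) := by
  rcases hpre : pre.any (fun k => pySetLt k c) with _ | _
  · rcases h : (minFil pre).any (fun k => pySetLt k c) with _ | _
    · rfl
    · obtain ⟨k, hk, hkc⟩ := List.any_eq_true.mp h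
      have hkpre : k ∈ pre := List.mem_filter.mp hk |>.1
      have : pre.any (fun k => pySetLt k c) = true := List.any_eq_true.mpr ⟨k, hkpre, hkc⟩
      rw [hpre] at this; exact absurd this (by simp)
  · obtain ⟨k, hk, hkc⟩ := List.any_eq_true.mp hpre
    obtain ⟨k0, hk0, hk0c, hk0min⟩ := descent pre c ⟨k, hk, hkc⟩
    refine List.any_eq_true.mpr ⟨k0, ?_, hk0c⟩
    refine List.mem_filter.mpr ⟨hk0, ?_⟩
    simp only [Bool.not_eq_true', List.any_eq_false]
    exact fun k' hk' => Bool.not_eq_true _ ▸ (by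
      rcases h' : pySetLt k' k0 with _ | _
      · rfl
      · exact absurd h' (hk0min k' hk'))

-- one step with the STRICT-subset skip advances the minimal filter by one new clause
theorem step_minFil (pre : List (List Int)) (c : List Int) :
    (if (minFil pre).any (fun k => pySetLt k c) then minFil pre
     else (minFil pre).filter (fun k => !pySetLt c k) ++ [c]) = minFil (pre ++ [c]) := by
  have hirr : pySetLt c c = false := by
    simp only [pySetLt]
    cases c.all (fun x => x ∈ c) <;> rfl
  have hpt : ∀ d, (!(pre ++ [c]).any (fun k => pySetLt k d))
      = ((!pre.any (fun k => pySetLt k d)) && !pySetLt c d) := by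
    intro d; simp [List.any_append]
  rcases hpre : pre.any (fun k => pySetLt k c) with _ | _
  · rw [any_minFil, hpre]
    simp only [Bool.false_eq_true, if_false]
    unfold minFil
    rw [List.filter_append, List.filter_filter]
    have hc2 : List.filter (fun clause => !(pre ++ [c]).any (fun conjuct => pySetLt conjuct clause)) [c] = [c] := by
      simp only [List.filter, hpt c, hpre, hirr]
      rfl
    rw [hc2]
    refine congrArg (· ++ [c]) ?_
    refine List.filter_congr ?_
    intro d _
    rw [hpt d]
    cases pre.any (fun k => pySetLt k d) <;> cases pySetLt c d <;> rfl
  · rw [any_minFil, hpre]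
    simp only [if_true]
    unfold minFil
    rw [List.filter_append]
    have hc2 : List.filter (fun clause => !(pre ++ [c]).any (fun conjuct => pySetLt conjuct clause)) [c] = [] := by
      simp only [List.filter, hpt c, hpre]
      rfl
    rw [hc2, List.append_nil]
    refine List.filter_congr ?_
    intro d _
    rw [hpt d]
    rcases hda : pre.any (fun k => pySetLt k d) with _ | _
    · obtain ⟨k, hk, hkc⟩ := List.any_eq_true.mp hpre
      rcases hcd : pySetLt c d with _ | _
      · rfl
      · exfalso
        have hkd : pySetLt k d = true := by
          rw [pySetLt_iff]
          exact ((pySetLt_iff k c).mp hkc).trans ((pySetLt_iff c d).mp hcd)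
        have : pre.any (fun k => pySetLt k d) = true := List.any_eq_true.mpr ⟨k, hk, hkd⟩
        rw [hda] at this; exact absurd this (by simp)
    · rfl

-- one step of B's loop advances the minimal filter of the DEDUPED prefix
theorem stepB_minFil (pre : List (List Int)) (c : List Int) :
    (if (minFil (dd pre)).any (fun k => pySetLe k c) then minFil (dd pre)
     else (minFil (dd pre)).filter (fun k => !pySetLt c k) ++ [c]) = minFil (dd (pre ++ [c])) := by
  have hdd : dd (pre ++ [c])
      = (if (dd pre).any (fun x => pySetEq x c) then dd pre else dd pre ++ [c]) := by
    simp [dd, List.foldl_append]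
  rcases hdup : (dd pre).any (fun x => pySetEq x c) with _ | _
  · -- c is new in the deduped list: no kept element is set-equal to c, so <= is <
    have hnoeq : (minFil (dd pre)).any (fun k => pySetEq k c) = false := by
      rcases h : (minFil (dd pre)).any (fun k => pySetEq k c) with _ | _
      · rfl
      · obtain ⟨k, hk, hkc⟩ := List.any_eq_true.mp h
        have : (dd pre).any (fun x => pySetEq x c) = true :=
          List.any_eq_true.mpr ⟨k, (List.mem_filter.mp hk).1, hkc⟩
        rw [hdup] at this; exact absurd this (by simp)
    have hle : (minFil (dd pre)).any (fun k => pySetLe k c)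
        = (minFil (dd pre)).any (fun k => pySetLt k c) := by
      rcases hlt : (minFil (dd pre)).any (fun k => pySetLt k c) with _ | _
      · refine List.any_eq_false.mpr ?_
        intro k hk
        rw [pySetLe_eq]
        have h1 := List.any_eq_false.mp hlt k hk
        have h2 := List.any_eq_false.mp hnoeq k hk
        simp only [Bool.not_eq_true] at h1 h2
        rw [h1, h2]; simp
      · obtain ⟨k, hk, hkc⟩ := List.any_eq_true.mp hlt
        refine List.any_eq_true.mpr ⟨k, hk, ?_⟩
        rw [pySetLe_eq, hkc, Bool.true_or]
    rw [hle, hdd, hdup]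
    simp only [Bool.false_eq_true, if_false]
    exact step_minFil (dd pre) c
  · -- c duplicates an already-seen clause: B skips it and the dedup list is unchanged
    have hskip : (minFil (dd pre)).any (fun k => pySetLe k c) = true := by
      obtain ⟨x, hx, hxc⟩ := List.any_eq_true.mp hdup
      rcases hxin : (dd pre).any (fun k => pySetLt k x) with _ | _
      · -- x itself is minimal, and x == c gives x <= c
        refine List.any_eq_true.mpr ⟨x, List.mem_filter.mpr ⟨hx, by simp [hxin]⟩, ?_⟩
        rw [pySetLe_eq, hxc, Bool.or_true]
      · -- a minimal strict subset of x exists; it is also a strict subset of c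
        obtain ⟨k, hk, hkx⟩ := List.any_eq_true.mp hxin
        obtain ⟨k0, hk0, hk0x, hk0min⟩ := descent (dd pre) x ⟨k, hk, hkx⟩
        have hk0c : pySetLt k0 c = true := by
          rw [pySetLt_iff]
          rw [pySetLt_iff] at hk0x
          rwa [(pySetEq_iff x c).mp hxc] at hk0x
        refine List.any_eq_true.mpr ⟨k0, List.mem_filter.mpr ⟨hk0, ?_⟩, ?_⟩
        · simp only [Bool.not_eq_true', List.any_eq_false]
          intro k' hk'
          simpa using hk0min k' hk'
        · rw [pySetLe_eq, hk0c, Bool.true_or]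
    rw [hskip, hdd, hdup]
    simp

-- B's whole loop, started on the antichain of the deduped prefix, computes A's filter
theorem antichain_loop (rest pre : List (List Int)) :
    rest.foldl (fun kept clause =>
      if kept.any (fun k => pySetLe k clause) then kept
      else kept.filter (fun k => !pySetLt clause k) ++ [clause]) (minFil (dd pre))
    = minFil (dd (pre ++ rest)) := by
  induction rest generalizing pre with
  | nil => simp
  | cons c rest' ih =>
    simp only [List.foldl_cons]
    rw [stepB_minFil pre c, ih (pre ++ [c]), List.append_assoc]
    rfl

-- ===== VERDICT (by name: the statement is the Claim_ definition above) =====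
theorem clean_clauses_py_spec : Claim_equal_clean_clauses_py := by
  intro clauses _
  unfold Spec_clean_clauses_py clean_clauses_py clean_clauses_py_alt
  -- A's second loop is the minimal-clause filter of the deduped list …
  have hA :
      (dd clauses).foldl (fun result clause =>
        let is_superset := (dd clauses).any (fun conjuct => pySetLt conjuct clause)
        if !is_superset then result ++ [clause] else result) []
      = minFil (dd clauses) := by
    have := PySem.List.foldl_append_if
      (fun clause => !(dd clauses).any (fun conjuct => pySetLt conjuct clause))
      (fun x => x) (dd clauses) []
    simpa [minFil] using this
  -- … and B's one-pass antichain loop computes the same list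
  have hB := antichain_loop clauses []
  simp only [List.nil_append] at hB
  show (dd clauses).foldl (fun result clause =>
      let is_superset := (dd clauses).any (fun conjuct => pySetLt conjuct clause)
      if !is_superset then result ++ [clause] else result) []
    = clauses.foldl (fun kept clause =>
      if kept.any (fun k => pySetLe k clause) then kept
      else kept.filter (fun k => !pySetLt clause k) ++ [clause]) []
  rw [hA, ← hB]
  rfl
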